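-- pv_equiv track=rewrite | github.com/abhishek1349/fintracker | gamification.py | get_next_level_threshold
-- ===== SOURCE A (Python) =====
-- def get_next_level_threshold(points):
--     """
--     Return points needed for next level
--     """
--     levels = [
--         (0, "Beginner"),
--         (250, "Apprentice"),
--         (500, "Intermediate"),
--         (1000, "Advanced"),
--         (2000, "Expert"),
--         (5000, "Master")
--     ]
--
--     for threshold, _ in levels:
--         if points < threshold:
--             return threshold
--
--     return None  # Already at max level
-- ===== SOURCE B (Python) =====
-- import bisect
--
-- _THRESHOLDS = [0, 250, 500, 1000, 2000, 5000]
--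
-- def get_next_level_threshold(points):
--     """
--     Return points needed for next level
--     """
--     i = bisect.bisect_right(_THRESHOLDS, points)
--     return _THRESHOLDS[i] if i < len(_THRESHOLDS) else None
-- ===== Notes on version B (the rewrite author's own statement) =====
-- stated objective: idiomatic
-- what changed: Replaced the sequential first-match scan over (threshold, name) pairs with a binary search (bisect.bisect_right) over a sorted threshold list.
import Mathlib
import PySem

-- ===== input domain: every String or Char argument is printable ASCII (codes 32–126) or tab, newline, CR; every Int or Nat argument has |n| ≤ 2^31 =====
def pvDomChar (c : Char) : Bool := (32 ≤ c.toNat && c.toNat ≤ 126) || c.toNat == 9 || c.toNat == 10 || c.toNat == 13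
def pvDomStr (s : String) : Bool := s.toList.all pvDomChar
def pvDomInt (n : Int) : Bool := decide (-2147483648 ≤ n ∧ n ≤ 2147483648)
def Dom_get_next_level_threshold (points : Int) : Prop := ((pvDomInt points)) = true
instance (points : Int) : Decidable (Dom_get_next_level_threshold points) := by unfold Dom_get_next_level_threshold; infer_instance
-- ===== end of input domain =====

-- ===== PORT A =====
-- A: sequential first-match scan over the (threshold, name) level list.
def pvScanLevels (points : Int) : List (Int × String) → Option Int
  | [] => none
  | (threshold, _) :: rest => if points < threshold then some threshold else pvScanLevels points rest

def get_next_level_threshold (points : Int) : Option Int :=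
  pvScanLevels points
    [(0, "Beginner"), (250, "Apprentice"), (500, "Intermediate"),
     (1000, "Advanced"), (2000, "Expert"), (5000, "Master")]

-- ===== PORT B =====
-- B: binary search (bisect_right) over a sorted threshold list; idiomatic alternative.
def pvThresholds : List Int := [0, 250, 500, 1000, 2000, 5000]

-- bisect.bisect_right on a list of Ints, transcribed as lo/hi binary search
def pvBisectRight (xs : List Int) (x : Int) (lo hi : Nat) : Nat :=
  if _h : lo < hi then
    let mid := (lo + hi) / 2
    if x < xs.getD mid 0 then pvBisectRight xs x lo mid
    else pvBisectRight xs x (mid + 1) hi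
  else lo
termination_by hi - lo
decreasing_by
  · omega
  · omega

def get_next_level_threshold_alt (points : Int) : Option Int :=
  let i := pvBisectRight pvThresholds points 0 pvThresholds.length
  if i < pvThresholds.length then some (pvThresholds.getD i 0) else none

-- ===== PRECONDITION & SPEC =====
def Spec_get_next_level_threshold (points : Int) (out : Option Int) : Prop := out = get_next_level_threshold_alt points
instance (points : Int) (out : Option Int) : Decidable (Spec_get_next_level_threshold points out) := by unfold Spec_get_next_level_threshold; infer_instance

-- ===== CLAIM (what is proved, stated in full; the proofs are below) =====
def Claim_equal_get_next_level_threshold : Prop := ∀ (points : Int), Dom_get_next_level_threshold points → Spec_get_next_level_threshold points (get_next_level_threshold points)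

-- ===== LEMMAS AND PROOFS =====

-- unfolding lemma for the binary search (its equation lemma, restated for rw)
theorem pvBR_step (xs : List Int) (x : Int) (lo hi : Nat) :
    pvBisectRight xs x lo hi =
      if lo < hi then
        (if x < xs.getD ((lo + hi) / 2) 0 then pvBisectRight xs x lo ((lo + hi) / 2)
         else pvBisectRight xs x ((lo + hi) / 2 + 1) hi)
      else lo := by
  rw [pvBisectRight]
  rfl

-- ===== VERDICT (by name: the statement is the Claim_ definition above) =====
theorem get_next_level_threshold_spec : Claim_equal_get_next_level_threshold := by
  intro points _
  unfold Spec_get_next_level_threshold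
  unfold get_next_level_threshold get_next_level_threshold_alt pvThresholds
  simp [pvScanLevels, pvBR_step, List.getD]
  split_ifs <;> simp_all <;> omega
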